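-- pv_equiv track=rewrite | github.com/sirote/advent-of-code | 2023/Day 13: Point of Incidence/point_of_incidence.py | horizontal_reflection
-- ===== SOURCE A (Python) =====
-- from itertools import pairwise
--
-- def find_indices(grid, allow_errors=0):
--     """Find indices of rows that differ by at most `allow_errors`
--     patterns.
--     """
--     for i, (row1, row2) in enumerate(pairwise(grid)):
--         if sum(a != b for a, b in zip(row1, row2)) <= allow_errors:
--             yield i
--
-- def horizontal_reflection(grid, smudges=0):
--     """Iterate over indices of first row of horizontal reflection
--     lines.
--     """
--     for i in find_indices(grid, allow_errors=smudges):
--         _smudges = smudges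
--         for j, k in zip(range(i + 1, len(grid)), range(i, -1, -1)):
--             diff = sum(a != b for a, b in zip(grid[j], grid[k]))
--             if diff <= _smudges:
--                 _smudges -= diff
--             else:
--                 break
--         else:
--             yield i
-- ===== SOURCE B (Python) =====
-- def horizontal_reflection(grid, smudges=0):
--     """Iterate over indices of first row of horizontal reflection lines.
--
--     Single streaming pass over all row pairs at odd gap g = 2*t + 1,
--     accumulating each pair's mismatch count into a totals bucket indexed
--     by the axis it belongs to (axis = a + t for pair (a, a + g)); an axis
--     is a reflection line iff its bucket total is within the smudge budget.
--     """
--     n = len(grid)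
--     totals = [0] * (n - 1)
--     for t in range(n // 2):
--         g = 2 * t + 1
--         for a in range(n - g):
--             totals[a + t] += sum(x != y for x, y in zip(grid[a], grid[a + g]))
--     return [i for i, total in enumerate(totals) if total <= smudges]
-- ===== Notes on version B (the rewrite author's own statement) =====
-- stated objective: alternative
-- what changed: Replaced A's per-axis mirror expansion (adjacent-row prefilter via find_indices, then for each candidate an expanding pair loop with a mutable remaining-smudge budget and early break) by a single streaming pass over all row pairs at odd gap g=2t+1 that accumulates each pair's mismatch count into a totals bucket indexed by its axis (a+t for pair (a,a+g)), followed by one filter of the buckets against the budget; equivalent because mismatch counts are non-negative and every odd-gap pair belongs to exactly one axis.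
import Mathlib
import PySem

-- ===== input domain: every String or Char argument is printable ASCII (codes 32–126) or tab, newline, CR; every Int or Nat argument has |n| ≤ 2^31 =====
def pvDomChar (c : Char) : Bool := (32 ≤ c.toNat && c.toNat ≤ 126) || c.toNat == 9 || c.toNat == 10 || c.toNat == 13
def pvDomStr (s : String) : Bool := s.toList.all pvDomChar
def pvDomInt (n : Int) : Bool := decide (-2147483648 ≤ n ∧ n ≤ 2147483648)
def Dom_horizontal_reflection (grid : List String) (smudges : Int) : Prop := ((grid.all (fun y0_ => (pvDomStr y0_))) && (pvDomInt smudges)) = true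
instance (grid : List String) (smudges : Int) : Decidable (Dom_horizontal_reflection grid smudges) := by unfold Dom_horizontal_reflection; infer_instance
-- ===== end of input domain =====

-- B replaces A's per-axis mirror expansion (adjacent-row prefilter, then an expanding loop with a
-- mutable remaining-smudge budget and early break) by one streaming pass over all row pairs at odd
-- gap, accumulating each pair's mismatch count into a totals bucket indexed by the axis the pair
-- belongs to, then filtering buckets by the budget (objective: alternative decomposition, same cost).

-- ===== PORT A =====
def pvHam (row1 row2 : String) : Int :=
  ((row1.toList.zip row2.toList).map (fun p => if p.1 ≠ p.2 then (1 : Int) else 0)).sum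

def pvRow (grid : List String) (j : Int) : String :=
  (PySem.List.pyGet? grid j).getD ""

def find_indices (grid : List String) (allow_errors : Int) : List Int :=
  (PySem.List.enumerate (grid.zip (grid.drop 1))).filterMap
    (fun p => if pvHam p.2.1 p.2.2 ≤ allow_errors then some p.1 else none)

def pvInner (grid : List String) : List (Int × Int) → Int → Bool
  | [], _ => true
  | (j, k) :: rest, s =>
      let diff := pvHam (pvRow grid j) (pvRow grid k)
      if diff ≤ s then pvInner grid rest (s - diff) else false

def horizontal_reflection (grid : List String) (smudges : Int) : List Int :=
  (find_indices grid smudges).filter (fun i =>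
    pvInner grid
      ((PySem.List.pyRange (i + 1) (grid.length : Int) 1).zip
        (PySem.List.pyRange i (-1) (-1))) smudges)

-- ===== PORT B =====
def horizontal_reflection_alt (grid : List String) (smudges : Int) : List Int :=
  let n := grid.length
  let totals :=
    (List.range (n / 2)).foldl
      (fun totals t =>
        (List.range (n - (2 * t + 1))).foldl
          (fun totals a =>
            totals.set (a + t)
              (totals.getD (a + t) 0 + pvHam (grid.getD a "") (grid.getD (a + (2 * t + 1)) "")))
          totals)
      (List.replicate (n - 1) 0)
  (PySem.List.enumerate totals).filterMap (fun p => if p.2 ≤ smudges then some p.1 else none)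

-- ===== PRECONDITION & SPEC =====
-- (no Pre_: the Python A returns normally on every input)
def Spec_horizontal_reflection (grid : List String) (smudges : Int) (out : List Int) : Prop := out = horizontal_reflection_alt grid smudges
instance (grid : List String) (smudges : Int) (out : List Int) : Decidable (Spec_horizontal_reflection grid smudges out) := by unfold Spec_horizontal_reflection; infer_instance

-- ===== CLAIM (what is proved, stated in full; the proofs are below) =====
def Claim_equal_horizontal_reflection : Prop := ∀ (grid : List String) (smudges : Int), Dom_horizontal_reflection grid smudges → Spec_horizontal_reflection grid smudges (horizontal_reflection grid smudges)

-- ===== LEMMAS AND PROOFS =====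

-- The common specification both ports are reduced to: axis i is kept iff the total mismatch count
-- over its mirrored row pairs is at most the budget.
def mSum (grid : List String) (i : Nat) : Int :=
  ((List.range (min (i + 1) (grid.length - 1 - i))).map
    (fun d => pvHam (grid.getD (i - d) "") (grid.getD (i + 1 + d) ""))).sum

def specList (grid : List String) (s : Int) : List Int :=
  List.map (fun (k : Nat) => (k : Int))
    ((List.range (grid.length - 1)).filter (fun k => decide (mSum grid k ≤ s)))

theorem pvHam_nonneg (r1 r2 : String) : 0 ≤ pvHam r1 r2 := by
  apply List.sum_nonneg
  intro x hx
  simp only [List.mem_map] at hx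
  obtain ⟨p, -, rfl⟩ := hx
  split <;> norm_num

theorem pvHam_comm (r1 r2 : String) : pvHam r1 r2 = pvHam r2 r1 := by
  unfold pvHam
  rw [← List.zip_swap r2.toList r1.toList, List.map_map]
  congr 1
  apply List.map_congr_left
  intro p _
  by_cases h : p.1 = p.2 <;> simp [Prod.swap, h, Ne, eq_comm]

theorem pvInner_iff (grid : List String) (pairs : List (Int × Int)) (s : Int) :
    pvInner grid pairs s = true ↔
      (pairs = [] ∨ (pairs.map (fun p => pvHam (pvRow grid p.1) (pvRow grid p.2))).sum ≤ s) := by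
  induction pairs generalizing s with
  | nil => simp [pvInner]
  | cons p rest ih =>
    obtain ⟨j, k⟩ := p
    have hrest : 0 ≤ (rest.map (fun p => pvHam (pvRow grid p.1) (pvRow grid p.2))).sum := by
      apply List.sum_nonneg
      intro x hx
      simp only [List.mem_map] at hx
      obtain ⟨q, -, rfl⟩ := hx
      exact pvHam_nonneg _ _
    by_cases h : pvHam (pvRow grid j) (pvRow grid k) ≤ s
    · simp only [pvInner, h, if_true, ih, List.map_cons, List.sum_cons,
        false_or, reduceCtorEq]
      rcases eq_or_ne rest ([] : List (Int × Int)) with hr | hr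
      · subst hr; simp [h]
      · simp [hr]; omega
    · simp only [pvInner, h, if_false, List.map_cons, List.sum_cons, reduceCtorEq, false_or]
      constructor
      · intro hc; cases hc
      · intro hc; omega

theorem zip_map_range {α β : Type} (f : Nat → α) (g : Nat → β) (m1 m2 : Nat) :
    ((List.range m1).map f).zip ((List.range m2).map g) =
      (List.range (min m1 m2)).map (fun d => (f d, g d)) := by
  apply List.ext_getElem
  · simp
  · intro i h1 h2
    simp [List.getElem_zip]

theorem pvRow_eq_getD (grid : List String) (k : Nat) (h : k < grid.length) :
    pvRow grid (k : Int) = grid.getD k "" := by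
  simp [pvRow, PySem.List.pyGet?_natCast, List.getElem?_eq_getElem h, List.getD,
    List.getD_eq_getElem?_getD]

theorem enumerate_pairwise (grid : List String) :
    PySem.List.enumerate (grid.zip (grid.drop 1)) 0 =
      (List.range (grid.length - 1)).map
        (fun (k : Nat) => ((k : Int), (grid.getD k "", grid.getD (k + 1) ""))) := by
  apply List.ext_getElem
  · simp [PySem.List.length_enumerate]
  · intro idx h1 h2
    have hidx : idx < grid.length - 1 := by
      simpa [PySem.List.length_enumerate] using h1
    have h1' : idx < grid.length := by omega
    have h2' : idx + 1 < grid.length := by omega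
    have hz : idx < (grid.zip (grid.drop 1)).length := by simp; omega
    have hL : (PySem.List.enumerate (grid.zip (grid.drop 1)) 0)[idx]'h1 =
        ((idx : Int), (grid[idx], grid[idx + 1])) := by
      rw [← Option.some_inj, ← List.getElem?_eq_getElem, PySem.List.getElem?_enumerate,
        List.getElem?_eq_getElem hz]
      simp only [List.getElem_zip, Option.map_some, List.getElem_drop]
      norm_num [Nat.add_comm]
    rw [hL, List.getElem_map, List.getElem_range]
    simp [List.getD, List.getD_eq_getElem?_getD, List.getElem?_eq_getElem h1',
      List.getElem?_eq_getElem h2']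

theorem filterMap_if_map {α β : Type} (l : List α) (p : α → Prop) [DecidablePred p] (f : α → β) :
    l.filterMap (fun k => if p k then some (f k) else none) =
      (l.filter (fun k => decide (p k))).map f := by
  induction l with
  | nil => rfl
  | cons x t ih =>
    by_cases h : p x <;> simp [h, ih]

theorem pairs_eq (grid : List String) (k : Nat) :
    ((PySem.List.pyRange ((k : Int) + 1) (grid.length : Int) 1).zip
        (PySem.List.pyRange (k : Int) (-1) (-1))) =
      (List.range (min (grid.length - (k + 1)) (k + 1))).map
        (fun (d : Nat) => ((k : Int) + 1 + (d : Int), (k : Int) - (d : Int))) := by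
  have h1 : PySem.List.pyRange ((k : Int) + 1) (grid.length : Int) 1 =
      (List.range (grid.length - (k + 1))).map (fun (d : Nat) => ((k : Int) + 1 + (d : Int))) := by
    simp only [PySem.List.pyRange]
    rw [if_neg (by norm_num : ¬ (1 : Int) = 0)]
    rw [if_pos (by norm_num : (0 : Int) < 1)]
    rcases lt_or_ge ((k : Int) + 1) (grid.length : Int) with h | h
    · rw [if_pos h]
      have he : ((grid.length : Int) - ((k : Int) + 1) + 1 - 1) / 1 = (grid.length : Int) - (k + 1) := by
        omega
      rw [he]
      have ht : ((grid.length : Int) - ((k : Int) + 1)).toNat = grid.length - (k + 1) := by omega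
      rw [ht]
      apply List.map_congr_left
      intro d _
      ring
    · rw [if_neg (by omega)]
      have : grid.length - (k + 1) = 0 := by omega
      simp [this]
  have h2 : PySem.List.pyRange (k : Int) (-1) (-1) =
      (List.range (k + 1)).map (fun (d : Nat) => ((k : Int) - (d : Int))) := by
    simp only [PySem.List.pyRange]
    rw [if_neg (by norm_num : ¬ (-1 : Int) = 0)]
    rw [if_neg (by norm_num : ¬ (0 : Int) < -1)]
    rw [if_pos (by omega : (-1 : Int) < (k : Int))]
    have he : ((k : Int) - -1 + - -1 - 1) / - -1 = (k : Int) + 1 := by norm_num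
    rw [he]
    have ht : ((k : Int) + 1).toNat = k + 1 := by omega
    rw [ht]
    apply List.map_congr_left
    intro d _
    ring
  rw [h1, h2, zip_map_range]

theorem pointwise_cond (grid : List String) (s : Int) (k : Nat) (hk : k < grid.length - 1) :
    (pvInner grid
        ((PySem.List.pyRange ((k : Int) + 1) (grid.length : Int) 1).zip
          (PySem.List.pyRange (k : Int) (-1) (-1))) s
      && decide (pvHam (grid.getD k "") (grid.getD (k + 1) "") ≤ s))
    = decide (mSum grid k ≤ s) := by
  rw [pairs_eq grid k]
  set m := min (grid.length - (k + 1)) (k + 1) with hmdef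
  have hm1 : 1 ≤ m := by omega
  -- the spec sum equals the sum of A's per-pair mismatch counts
  have hS : mSum grid k
      = (List.map ((fun p => pvHam (pvRow grid p.1) (pvRow grid p.2)) ∘
          (fun (d : Nat) => ((k : Int) + 1 + (d : Int), (k : Int) - (d : Int)))) (List.range m)).sum := by
    unfold mSum
    have hM : min (k + 1) (grid.length - 1 - k) = m := by omega
    rw [hM]
    congr 1
    apply List.map_congr_left
    intro d hd
    simp only [List.mem_range] at hd
    have hd1 : d ≤ k := by omega
    have hd2 : k + 1 + d < grid.length := by omega
    have e1 : (k : Int) - (d : Int) = ((k - d : Nat) : Int) := by omega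
    have e2 : (k : Int) + 1 + (d : Int) = ((k + 1 + d : Nat) : Int) := by omega
    simp only [Function.comp]
    rw [e1, e2, pvRow_eq_getD grid (k - d) (by omega), pvRow_eq_getD grid (k + 1 + d) hd2,
      pvHam_comm]
  set S := mSum grid k with hSdef
  have hinner : pvInner grid
      (List.map (fun (d : Nat) => ((k : Int) + 1 + (d : Int), (k : Int) - (d : Int))) (List.range m)) s
      = decide (S ≤ s) := by
    rcases le_or_gt S s with h | h
    · rw [decide_eq_true h]
      rw [pvInner_iff]
      right
      rw [List.map_map]
      rw [hS] at h
      exact h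
    · rw [decide_eq_false (by omega)]
      rw [← Bool.not_eq_true, pvInner_iff]
      rw [List.map_map]
      push_neg
      constructor
      · intro hnil
        have : (List.range m).length = 0 := by
          simpa using congrArg List.length hnil
        simp at this
        omega
      · rw [← hS]; omega
  rw [hinner]
  -- when the total fits the budget, the adjacent pair in particular fits it
  have hfirst : S ≤ s → pvHam (grid.getD k "") (grid.getD (k + 1) "") ≤ s := by
    intro hSle
    obtain ⟨j, hj⟩ : ∃ j, m = j + 1 := ⟨m - 1, by omega⟩
    rw [hSdef] at hSle
    unfold mSum at hSle
    have hM : min (k + 1) (grid.length - 1 - k) = m := by omega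
    rw [hM, hj, List.range_succ_eq_map, List.map_cons, List.sum_cons] at hSle
    have hrest : 0 ≤ ((List.range j).map (Nat.succ) |>.map
        (fun d => pvHam (grid.getD (k - d) "") (grid.getD (k + 1 + d) ""))).sum := by
      apply List.sum_nonneg
      intro x hx
      simp only [List.mem_map] at hx
      obtain ⟨q, -, rfl⟩ := hx
      exact pvHam_nonneg _ _
    simp only [Nat.sub_zero, Nat.add_zero] at hSle
    omega
  rcases le_or_gt S s with h | h
  · rw [decide_eq_true h, decide_eq_true (hfirst h), Bool.true_and]
  · rw [decide_eq_false (by omega : ¬ S ≤ s), Bool.false_and]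

theorem A_eq_spec (grid : List String) (s : Int) :
    horizontal_reflection grid s = specList grid s := by
  unfold horizontal_reflection find_indices specList
  rw [enumerate_pairwise, List.filterMap_map]
  have hcomp : ((fun (p : Int × String × String) => if pvHam p.2.1 p.2.2 ≤ s then some p.1 else none)
      ∘ (fun (k : Nat) => ((k : Int), (grid.getD k "", grid.getD (k + 1) ""))))
      = (fun (k : Nat) => if pvHam (grid.getD k "") (grid.getD (k + 1) "") ≤ s then some ((k : Int)) else none) := rfl
  rw [hcomp, filterMap_if_map, List.filter_map, List.filter_filter]
  refine congrArg (List.map _) ?_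
  apply List.filter_congr
  intro k hk
  simp only [List.mem_range] at hk
  exact pointwise_cond grid s k hk

-- ===== B side =====

theorem length_foldl_inc (l : List (Nat × Int)) (acc : List Int) :
    (l.foldl (fun acc p => acc.set p.1 (acc.getD p.1 0 + p.2)) acc).length = acc.length := by
  induction l generalizing acc with
  | nil => rfl
  | cons p rest ih => rw [List.foldl_cons, ih]; simp

theorem getD_set_add (acc : List Int) (j : Nat) (v : Int) (hj : j < acc.length) (i : Nat) :
    (acc.set j (acc.getD j 0 + v)).getD i 0 = acc.getD i 0 + (if j = i then v else 0) := by
  rw [List.getD_eq_getElem?_getD, List.getD_eq_getElem?_getD, List.getElem?_set]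
  by_cases h : j = i
  · subst h
    simp [hj, List.getD_eq_getElem?_getD]
  · simp [h]

theorem getD_foldl_inc (l : List (Nat × Int)) (acc : List Int)
    (hall : ∀ p ∈ l, p.1 < acc.length) (i : Nat) :
    (l.foldl (fun acc p => acc.set p.1 (acc.getD p.1 0 + p.2)) acc).getD i 0
      = acc.getD i 0 + ((l.filter (fun p => decide (p.1 = i))).map Prod.snd).sum := by
  induction l generalizing acc with
  | nil => simp
  | cons p rest ih =>
    have hp : p.1 < acc.length := hall p (by simp)
    have hlen : (acc.set p.1 (acc.getD p.1 0 + p.2)).length = acc.length := by simp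
    rw [List.foldl_cons, ih _ (by intro q hq; rw [hlen]; exact hall q (by simp [hq])),
      getD_set_add acc p.1 p.2 hp i]
    by_cases h : p.1 = i <;> simp [h] <;> omega

theorem foldl_flatMap' {α β γ : Type} (l : List α) (f : α → List β) (g : γ → β → γ) (init : γ) :
    (l.flatMap f).foldl g init = l.foldl (fun acc x => (f x).foldl g acc) init := by
  induction l generalizing init with
  | nil => rfl
  | cons x rest ih => simp [List.flatMap_cons, List.foldl_append, ih]

theorem filter_flatMap' {α β : Type} (l : List α) (f : α → List β) (p : β → Bool) :
    (l.flatMap f).filter p = l.flatMap (fun x => (f x).filter p) := by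
  induction l with
  | nil => rfl
  | cons x rest ih => simp [List.flatMap_cons, List.filter_append, ih]

theorem sum_flatMap' {α : Type} (l : List α) (f : α → List Int) :
    (l.flatMap f).sum = (l.map (fun x => (f x).sum)).sum := by
  induction l with
  | nil => rfl
  | cons x rest ih => simp [List.flatMap_cons, List.sum_append, ih]

theorem filter_range_shift (N t i : Nat) :
    (List.range N).filter (fun a => decide (a + t = i)) =
      if t ≤ i ∧ i - t < N then [i - t] else [] := by
  induction N with
  | zero =>
    rw [if_neg (by omega)]
    rfl
  | succ n ih =>
    rw [List.range_succ, List.filter_append, ih]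
    by_cases h : n + t = i
    · rw [if_neg (by omega), if_pos (by omega)]
      simp [h]
      omega
    · rw [List.filter_singleton]
      by_cases hc : t ≤ i ∧ i - t < n
      · rw [if_pos hc, if_pos (by omega)]
        simp [h]
      · rw [if_neg hc, if_neg (by omega)]
        simp [h]

def pvP (grid : List String) : List (Nat × Int) :=
  (List.range (grid.length / 2)).flatMap (fun t =>
    (List.range (grid.length - (2 * t + 1))).map (fun a =>
      (a + t, pvHam (grid.getD a "") (grid.getD (a + (2 * t + 1)) ""))))

theorem pvP_fst_lt (grid : List String) : ∀ p ∈ pvP grid, p.1 < grid.length - 1 := by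
  intro p hp
  unfold pvP at hp
  simp only [List.mem_flatMap, List.mem_map, List.mem_range] at hp
  obtain ⟨t, ht, a, ha, rfl⟩ := hp
  omega

theorem sum_map_range_ite (K M : Nat) (f : Nat → Int) (h : M ≤ K) :
    ((List.range K).map (fun t => if t < M then f t else 0)).sum = ((List.range M).map f).sum := by
  obtain ⟨D, rfl⟩ : ∃ D, K = M + D := ⟨K - M, by omega⟩
  rw [List.range_add, List.map_append, List.sum_append]
  have h1 : (List.range M).map (fun t => if t < M then f t else 0) = (List.range M).map f := by
    apply List.map_congr_left
    intro t ht
    simp only [List.mem_range] at ht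
    simp [ht]
  have h2 : ((List.range D).map (fun x => M + x)).map (fun t => if t < M then f t else 0)
      = (List.range D).map (fun _ => (0 : Int)) := by
    rw [List.map_map]
    apply List.map_congr_left
    intro x _
    simp
  rw [h1, h2]
  simp

theorem P_filter_sum (grid : List String) (i : Nat) (_hi : i < grid.length - 1) :
    (((pvP grid).filter (fun p => decide (p.1 = i))).map Prod.snd).sum = mSum grid i := by
  unfold pvP mSum
  rw [filter_flatMap', List.map_flatMap, sum_flatMap']
  have hstep : ∀ t ∈ List.range (grid.length / 2),
      ((((List.range (grid.length - (2 * t + 1))).map (fun a =>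
          (a + t, pvHam (grid.getD a "") (grid.getD (a + (2 * t + 1)) "")))).filter
            (fun p => decide (p.1 = i)) |>.map Prod.snd).sum
      = (if t < min (i + 1) (grid.length - 1 - i) then
          pvHam (grid.getD (i - t) "") (grid.getD (i + 1 + t) "") else 0)) := by
    intro t _
    have hpred : ((fun (p : Nat × Int) => decide (p.1 = i)) ∘
        (fun a => (a + t, pvHam (grid.getD a "") (grid.getD (a + (2 * t + 1)) "")))) =
        (fun a => decide (a + t = i)) := rfl
    rw [List.filter_map, hpred, filter_range_shift (grid.length - (2 * t + 1)) t i]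
    by_cases hc : t ≤ i ∧ i - t < grid.length - (2 * t + 1)
    · rw [if_pos hc, if_pos (by omega)]
      have e : i - t + (2 * t + 1) = i + 1 + t := by omega
      simp [e]
    · rw [if_neg hc, if_neg (by omega)]
      rfl
  rw [List.map_congr_left hstep]
  exact sum_map_range_ite (grid.length / 2) (min (i + 1) (grid.length - 1 - i)) _ (by omega)

theorem B_eq_spec (grid : List String) (s : Int) :
    horizontal_reflection_alt grid s = specList grid s := by
  unfold horizontal_reflection_alt
  simp only []
  set T := (List.range (grid.length / 2)).foldl
      (fun totals t =>
        (List.range (grid.length - (2 * t + 1))).foldl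
          (fun totals a =>
            totals.set (a + t)
              (totals.getD (a + t) 0 + pvHam (grid.getD a "") (grid.getD (a + (2 * t + 1)) "")))
          totals)
      (List.replicate (grid.length - 1) 0) with hTdef
  have hfold : T = (pvP grid).foldl (fun acc p => acc.set p.1 (acc.getD p.1 0 + p.2))
      (List.replicate (grid.length - 1) 0) := by
    rw [hTdef, pvP, foldl_flatMap']
    simp only [List.foldl_map]
  have hlen : T.length = grid.length - 1 := by
    rw [hfold, length_foldl_inc]
    simp
  have hT : ∀ k, k < grid.length - 1 → T.getD k 0 = mSum grid k := by
    intro k hk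
    rw [hfold, getD_foldl_inc _ _ (by intro p hp; rw [List.length_replicate]; exact pvP_fst_lt grid p hp),
      P_filter_sum grid k hk]
    simp [List.getD_eq_getElem?_getD, List.getElem?_replicate, hk]
  rw [PySem.List.enumerate_eq_map_pyRange (d := 0), List.filterMap_map]
  have hcast : (T.length : Int) = ((grid.length - 1 : Nat) : Int) := by rw [hlen]
  rw [PySem.List.len_eq, hcast, PySem.List.pyRange_zero_natCast, List.filterMap_map]
  have hcomp : (((fun (p : Int × Int) => if p.2 ≤ s then some p.1 else none)
        ∘ (fun j => (j, PySem.List.pyGetD T j 0))) ∘ (fun (k : Nat) => (k : Int)))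
      = (fun (k : Nat) => if T.getD k 0 ≤ s then some ((k : Int)) else none) := by
    funext k
    simp [Function.comp, PySem.List.pyGetD_natCast]
  rw [hcomp, filterMap_if_map]
  unfold specList
  refine congrArg (List.map _) ?_
  apply List.filter_congr
  intro k hk
  simp only [List.mem_range] at hk
  rw [hT k hk]

-- ===== VERDICT (by name: the statement is the Claim_ definition above) =====
theorem horizontal_reflection_spec : Claim_equal_horizontal_reflection := by
  intro grid s _
  unfold Spec_horizontal_reflection
  rw [A_eq_spec, B_eq_spec]
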